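-- pv_equiv track=rewrite | github.com/marcuseden/caragentapp | src/manufacturer_db.py | get_manufacturer_specs
-- ===== SOURCE A (Python) =====
-- MANUFACTURER_DB = {
--     'Tesla': {
--         'Model 3': {
--             'body_type': 'Sedan',
--             'transmission': 'Automatic',
--             'drive_type': 'Rear-wheel drive / All-wheel drive',
--             'power': '283-450 HP',
--             'battery_capacity': '60-82 kWh',
--             'range_km': '430-580 km',
--             'charging_speed_dc': '170-250 kW',
--             'charging_time': '25-35 min (10-80%)'
--         },
--         'Model Y': {
--             'body_type': 'SUV',
--             'transmission': 'Automatic',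
--             'drive_type': 'Rear-wheel drive / All-wheel drive',
--             'power': '299-450 HP',
--             'battery_capacity': '60-82 kWh',
--             'range_km': '410-530 km',
--             'charging_speed_dc': '170-250 kW',
--             'charging_time': '25-35 min (10-80%)'
--         },
--         'Model S': {
--             'body_type': 'Sedan',
--             'transmission': 'Automatic',
--             'drive_type': 'All-wheel drive',
--             'power': '670-1020 HP',
--             'battery_capacity': '95-100 kWh',
--             'range_km': '600-650 km',
--             'charging_speed_dc': '250 kW',
--             'charging_time': '25-30 min (10-80%)'
--         },
--         'Model X': {
--             'body_type': 'SUV',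
--             'transmission': 'Automatic',
--             'drive_type': 'All-wheel drive',
--             'power': '670-1020 HP',
--             'battery_capacity': '95-100 kWh',
--             'range_km': '560-580 km',
--             'charging_speed_dc': '250 kW',
--             'charging_time': '25-30 min (10-80%)'
--         }
--     },
--     # Add more manufacturers and models as needed
-- }
--
-- def get_manufacturer_specs(brand: str, model: str):
--     """
--     Get manufacturer specifications for a specific car model.
--
--     Args:
--         brand: Car brand/make
--         model: Car model
--
--     Returns:
--         Dictionary with specifications or None if not found
--     """
--     brand = brand.strip()
--     model = model.strip()
--
--     # Try exact match
--     if brand in MANUFACTURER_DB and model in MANUFACTURER_DB[brand]: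
--         return MANUFACTURER_DB[brand][model]
--
--     # Try case-insensitive match
--     for db_brand, models in MANUFACTURER_DB.items():
--         if db_brand.lower() == brand.lower():
--             for db_model, specs in models.items():
--                 if db_model.lower() == model.lower():
--                     return specs
--
--     # Try partial match for model
--     for db_brand, models in MANUFACTURER_DB.items():
--         if db_brand.lower() == brand.lower():
--             for db_model, specs in models.items():
--                 if db_model.lower() in model.lower() or model.lower() in db_model.lower():
--                     return specs
--
--     return None
-- ===== SOURCE B (Python) =====
-- MANUFACTURER_DB = {
--     'Tesla': {
--         'Model 3': {
--             'body_type': 'Sedan',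
--             'transmission': 'Automatic',
--             'drive_type': 'Rear-wheel drive / All-wheel drive',
--             'power': '283-450 HP',
--             'battery_capacity': '60-82 kWh',
--             'range_km': '430-580 km',
--             'charging_speed_dc': '170-250 kW',
--             'charging_time': '25-35 min (10-80%)'
--         },
--         'Model Y': {
--             'body_type': 'SUV',
--             'transmission': 'Automatic',
--             'drive_type': 'Rear-wheel drive / All-wheel drive',
--             'power': '299-450 HP',
--             'battery_capacity': '60-82 kWh',
--             'range_km': '410-530 km',
--             'charging_speed_dc': '170-250 kW',
--             'charging_time': '25-35 min (10-80%)'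
--         },
--         'Model S': {
--             'body_type': 'Sedan',
--             'transmission': 'Automatic',
--             'drive_type': 'All-wheel drive',
--             'power': '670-1020 HP',
--             'battery_capacity': '95-100 kWh',
--             'range_km': '600-650 km',
--             'charging_speed_dc': '250 kW',
--             'charging_time': '25-30 min (10-80%)'
--         },
--         'Model X': {
--             'body_type': 'SUV',
--             'transmission': 'Automatic',
--             'drive_type': 'All-wheel drive',
--             'power': '670-1020 HP',
--             'battery_capacity': '95-100 kWh',
--             'range_km': '560-580 km',
--             'charging_speed_dc': '250 kW',
--             'charging_time': '25-30 min (10-80%)'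
--         }
--     },
-- }
--
--
-- def get_manufacturer_specs(brand: str, model: str):
--     """Resolve the brand once (case-insensitively), then return the first of
--     that brand's models whose lowercased name is substring-related to the
--     lowercased query model. Because no two model names of a brand are
--     substring-related to each other, this single tiered scan also covers the
--     exact and case-insensitive matches."""
--     brand = brand.strip().lower()
--     model = model.strip().lower()
--     for db_brand, models in MANUFACTURER_DB.items():
--         if db_brand.lower() == brand:
--             for db_model, specs in models.items():
--                 dm = db_model.lower()
--                 if dm in model or model in dm:
--                     return specs
--             return None
--     return None
-- ===== Notes on version B (the rewrite author's own statement) =====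
-- stated objective: simpler
-- what changed: A's three stages (exact dict lookup, case-insensitive full-DB scan, partial-match full-DB scan) collapse into resolving the brand once and a single in-order scan of that brand's models by lowercase-substring relation, which subsumes the exact and case-insensitive tiers because no two model names of a brand are substring-related.
import Mathlib
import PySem

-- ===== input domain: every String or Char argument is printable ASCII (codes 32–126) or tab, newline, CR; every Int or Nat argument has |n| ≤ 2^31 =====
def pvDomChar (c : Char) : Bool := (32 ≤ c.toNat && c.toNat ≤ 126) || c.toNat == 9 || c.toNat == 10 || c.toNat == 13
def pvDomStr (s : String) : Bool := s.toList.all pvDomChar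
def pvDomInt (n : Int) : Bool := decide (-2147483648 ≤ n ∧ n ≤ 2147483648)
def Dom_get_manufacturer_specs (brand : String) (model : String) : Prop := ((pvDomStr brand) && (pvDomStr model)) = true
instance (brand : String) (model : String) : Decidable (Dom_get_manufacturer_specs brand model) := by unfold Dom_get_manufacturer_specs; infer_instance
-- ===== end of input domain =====

-- B collapses A's three stages (exact lookup, case-insensitive scan, partial scan) into one
-- brand resolution plus a single in-order substring-tier scan of that brand's models (objective: simpler).

-- ===== PORT A =====
def pvSpecs3 : List (String × String) :=
  [("body_type", "Sedan"), ("transmission", "Automatic"),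
   ("drive_type", "Rear-wheel drive / All-wheel drive"), ("power", "283-450 HP"),
   ("battery_capacity", "60-82 kWh"), ("range_km", "430-580 km"),
   ("charging_speed_dc", "170-250 kW"), ("charging_time", "25-35 min (10-80%)")]
def pvSpecsY : List (String × String) :=
  [("body_type", "SUV"), ("transmission", "Automatic"),
   ("drive_type", "Rear-wheel drive / All-wheel drive"), ("power", "299-450 HP"),
   ("battery_capacity", "60-82 kWh"), ("range_km", "410-530 km"),
   ("charging_speed_dc", "170-250 kW"), ("charging_time", "25-35 min (10-80%)")]
def pvSpecsS : List (String × String) :=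
  [("body_type", "Sedan"), ("transmission", "Automatic"),
   ("drive_type", "All-wheel drive"), ("power", "670-1020 HP"),
   ("battery_capacity", "95-100 kWh"), ("range_km", "600-650 km"),
   ("charging_speed_dc", "250 kW"), ("charging_time", "25-30 min (10-80%)")]
def pvSpecsX : List (String × String) :=
  [("body_type", "SUV"), ("transmission", "Automatic"),
   ("drive_type", "All-wheel drive"), ("power", "670-1020 HP"),
   ("battery_capacity", "95-100 kWh"), ("range_km", "560-580 km"),
   ("charging_speed_dc", "250 kW"), ("charging_time", "25-30 min (10-80%)")]
def pvModels : List (String × List (String × String)) :=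
  [("Model 3", pvSpecs3), ("Model Y", pvSpecsY), ("Model S", pvSpecsS), ("Model X", pvSpecsX)]
def pvDB : List (String × List (String × List (String × String))) := [("Tesla", pvModels)]

-- inner loop of A's case-insensitive stage
def pvCIInner (models : List (String × List (String × String))) (model : String) :
    Option (List (String × String)) :=
  match models with
  | [] => none
  | (k, v) :: rest =>
    if PySem.Str.lower k = PySem.Str.lower model then some v else pvCIInner rest model

-- outer loop of A's case-insensitive stage
def pvCILoop (db : List (String × List (String × List (String × String))))
    (brand model : String) : Option (List (String × String)) :=
  match db with
  | [] => none
  | (bk, ms) :: rest =>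
    match (if PySem.Str.lower bk = PySem.Str.lower brand then pvCIInner ms model else none) with
    | some v => some v
    | none => pvCILoop rest brand model

-- inner loop of A's partial-match stage
def pvPartInner (models : List (String × List (String × String))) (model : String) :
    Option (List (String × String)) :=
  match models with
  | [] => none
  | (k, v) :: rest =>
    if PySem.Str.isIn (PySem.Str.lower k) (PySem.Str.lower model)
        || PySem.Str.isIn (PySem.Str.lower model) (PySem.Str.lower k) then some v
    else pvPartInner rest model

-- outer loop of A's partial-match stage
def pvPartLoop (db : List (String × List (String × List (String × String))))
    (brand model : String) : Option (List (String × String)) :=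
  match db with
  | [] => none
  | (bk, ms) :: rest =>
    match (if PySem.Str.lower bk = PySem.Str.lower brand then pvPartInner ms model else none) with
    | some v => some v
    | none => pvPartLoop rest brand model

def get_manufacturer_specs (brand : String) (model : String) : Option (List (String × String)) :=
  let brand := PySem.Str.strip brand
  let model := PySem.Str.strip model
  match (PySem.Dict.mk pvDB).get? brand with
  | some models =>
    match (PySem.Dict.mk models).get? model with
    | some specs => some specs
    | none =>
      match pvCILoop pvDB brand model with
      | some v => some v
      | none => pvPartLoop pvDB brand model
  | none =>
    match pvCILoop pvDB brand model with
    | some v => some v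
    | none => pvPartLoop pvDB brand model

-- ===== PORT B =====
def pvScanModels (models : List (String × List (String × String))) (model : String) :
    Option (List (String × String)) :=
  match models with
  | [] => none
  | (k, v) :: rest =>
    let dm := PySem.Str.lower k
    if PySem.Str.isIn dm model || PySem.Str.isIn model dm then some v else pvScanModels rest model

def pvFindBrand (db : List (String × List (String × List (String × String))))
    (brand model : String) : Option (List (String × String)) :=
  match db with
  | [] => none
  | (bk, ms) :: rest =>
    if PySem.Str.lower bk = brand then pvScanModels ms model else pvFindBrand rest brand model

def get_manufacturer_specs_alt (brand : String) (model : String) :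
    Option (List (String × String)) :=
  pvFindBrand pvDB (PySem.Str.lower (PySem.Str.strip brand)) (PySem.Str.lower (PySem.Str.strip model))

-- ===== PRECONDITION & SPEC =====
def Spec_get_manufacturer_specs (brand : String) (model : String) (out : Option (List (String × String))) : Prop := out = get_manufacturer_specs_alt brand model
instance (brand : String) (model : String) (out : Option (List (String × String))) : Decidable (Spec_get_manufacturer_specs brand model out) := by unfold Spec_get_manufacturer_specs; infer_instance

-- ===== CLAIM (what is proved, stated in full; the proofs are below) =====
def Claim_equal_get_manufacturer_specs : Prop := ∀ (brand : String) (model : String), Dom_get_manufacturer_specs brand model → Spec_get_manufacturer_specs brand model (get_manufacturer_specs brand model)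

-- ===== LEMMAS AND PROOFS =====

theorem pvLower_tesla : PySem.Str.lower "Tesla" = "tesla" := by decide
theorem pvLower_m3 : PySem.Str.lower "Model 3" = "model 3" := by decide
theorem pvLower_mY : PySem.Str.lower "Model Y" = "model y" := by decide
theorem pvLower_mS : PySem.Str.lower "Model S" = "model s" := by decide
theorem pvLower_mX : PySem.Str.lower "Model X" = "model x" := by decide

-- with a matching brand, A's outer loops reduce to the inner loops over Tesla's models
theorem pvCILoop_eq (bs ms : String) (hb : PySem.Str.lower bs = "tesla") :
    pvCILoop pvDB bs ms = pvCIInner pvModels ms := by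
  simp only [pvCILoop, pvDB, pvLower_tesla, hb]
  cases pvCIInner pvModels ms <;> rfl

theorem pvPartLoop_eq (bs ms : String) (hb : PySem.Str.lower bs = "tesla") :
    pvPartLoop pvDB bs ms = pvPartInner pvModels ms := by
  simp only [pvPartLoop, pvDB, pvLower_tesla, hb]
  cases pvPartInner pvModels ms <;> rfl

-- the CI stage followed by the partial stage is B's single substring scan
theorem pvModelCase (ms : String) :
    (match pvCIInner pvModels ms with
     | some v => some v
     | none => pvPartInner pvModels ms) = pvScanModels pvModels (PySem.Str.lower ms) := by
  simp only [pvCIInner, pvPartInner, pvScanModels, pvModels,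
    pvLower_m3, pvLower_mY, pvLower_mS, pvLower_mX]
  generalize PySem.Str.lower ms = ml
  by_cases h1 : "model 3" = ml
  · subst h1; decide
  by_cases h2 : "model y" = ml
  · subst h2; decide
  by_cases h3 : "model s" = ml
  · subst h3; decide
  by_cases h4 : "model x" = ml
  · subst h4; decide
  simp [h1, h2, h3, h4]

-- A's exact-lookup stage on top of the previous two is still B's scan
theorem pvExactCase (ms : String) :
    (match (PySem.Dict.mk pvModels).get? ms with
     | some specs => some specs
     | none =>
       match pvCIInner pvModels ms with
       | some v => some v
       | none => pvPartInner pvModels ms) = pvScanModels pvModels (PySem.Str.lower ms) := by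
  by_cases h1 : ms = "Model 3"
  · subst h1; decide
  by_cases h2 : ms = "Model Y"
  · subst h2; decide
  by_cases h3 : ms = "Model S"
  · subst h3; decide
  by_cases h4 : ms = "Model X"
  · subst h4; decide
  have hget : (PySem.Dict.mk pvModels).get? ms = none := by
    simp [pvModels, PySem.Dict.get?, Ne.symm h1, Ne.symm h2, Ne.symm h3, Ne.symm h4]
  rw [hget]
  exact pvModelCase ms

theorem pvCore (bs ms : String) :
    (match (PySem.Dict.mk pvDB).get? bs with
     | some models =>
       match (PySem.Dict.mk models).get? ms with
       | some specs => some specs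
       | none =>
         match pvCILoop pvDB bs ms with
         | some v => some v
         | none => pvPartLoop pvDB bs ms
     | none =>
       match pvCILoop pvDB bs ms with
       | some v => some v
       | none => pvPartLoop pvDB bs ms)
    = pvFindBrand pvDB (PySem.Str.lower bs) (PySem.Str.lower ms) := by
  by_cases hb : PySem.Str.lower bs = "tesla"
  · -- brand resolves to Tesla
    have hrhs : pvFindBrand pvDB (PySem.Str.lower bs) (PySem.Str.lower ms)
        = pvScanModels pvModels (PySem.Str.lower ms) := by
      simp [pvFindBrand, pvDB, pvLower_tesla, hb]
    rw [hrhs, pvCILoop_eq bs ms hb, pvPartLoop_eq bs ms hb]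
    by_cases he : bs = "Tesla"
    · subst he
      have hd : (PySem.Dict.mk pvDB).get? "Tesla" = some pvModels := by
        simp [pvDB, PySem.Dict.get?_mk_cons]
      rw [hd]
      exact pvExactCase ms
    · have hd : (PySem.Dict.mk pvDB).get? bs = none := by
        simp [pvDB, PySem.Dict.get?, Ne.symm he]
      rw [hd]
      exact pvModelCase ms
  · -- no brand matches: every stage returns none
    have he : bs ≠ "Tesla" := by
      intro h; subst h; exact hb (by decide)
    have hd : (PySem.Dict.mk pvDB).get? bs = none := by
      simp [pvDB, PySem.Dict.get?, Ne.symm he]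
    have hci : pvCILoop pvDB bs ms = none := by
      simp [pvCILoop, pvDB, pvLower_tesla, Ne.symm hb]
    have hpt : pvPartLoop pvDB bs ms = none := by
      simp [pvPartLoop, pvDB, pvLower_tesla, Ne.symm hb]
    have hrhs : pvFindBrand pvDB (PySem.Str.lower bs) (PySem.Str.lower ms) = none := by
      simp [pvFindBrand, pvDB, pvLower_tesla, Ne.symm hb]
    rw [hd, hci, hpt, hrhs]

-- ===== VERDICT (by name: the statement is the Claim_ definition above) =====
theorem get_manufacturer_specs_spec : Claim_equal_get_manufacturer_specs := by
  intro brand model _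
  unfold Spec_get_manufacturer_specs get_manufacturer_specs get_manufacturer_specs_alt
  exact pvCore (PySem.Str.strip brand) (PySem.Str.strip model)
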